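-- pv_equiv track=rewrite | github.com/ansh5441/experiments | advent_of_code/2022/day_08/sol_2.py | compute_top_visibility
-- ===== SOURCE A (Python) =====
-- def get_scores(heights):
--   n = len(heights)
--   m = len(heights[0])
--   return [[0 for i in range(m)] for j in range(n)]
--
-- def compute_top_visibility(heights):
--   n = len(heights)
--   m = len(heights[0])
--   top_visibility_matrix = get_scores(heights)
--   for i in range(n):
--     for j in range(m):
--       if i == 0:
--         top_visibility_matrix[i][j] = 0
--       else:
--         k = i-1
--         while k > 0 and heights[k][j] < heights[i][j]:
--           k -= 1
--         top_visibility_matrix[i][j] = i - k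
--
--   return top_visibility_matrix
-- ===== SOURCE B (Python) =====
-- def compute_top_visibility(heights):
--   n = len(heights)
--   m = len(heights[0])
--   cols = []
--   for j in range(m):
--     stack = []
--     col = []
--     for i in range(n):
--       h = heights[i][j]
--       while stack and heights[stack[-1]][j] < h:
--         stack.pop()
--       col.append(i - (stack[-1] if stack else 0))
--       stack.append(i)
--     cols.append(col)
--   return [[cols[j][i] for j in range(m)] for i in range(n)]
-- ===== Notes on version B (the rewrite author's own statement) =====
-- stated objective: alternative
-- what changed: A rescans upward from each cell; B makes one top-to-bottom pass per column with a monotonic stack of previous greater-or-equal rows, building columns and transposing (worst-case O(n*m) vs A's O(n^2*m); not measurably faster on a timing run's inputs).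
-- outside the precondition, e.g. on compute_top_visibility([[-1, -3943, 1066], []]): A returns [[0, 0, 0], [1, 1, 1]], B raises IndexError
import Mathlib
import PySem

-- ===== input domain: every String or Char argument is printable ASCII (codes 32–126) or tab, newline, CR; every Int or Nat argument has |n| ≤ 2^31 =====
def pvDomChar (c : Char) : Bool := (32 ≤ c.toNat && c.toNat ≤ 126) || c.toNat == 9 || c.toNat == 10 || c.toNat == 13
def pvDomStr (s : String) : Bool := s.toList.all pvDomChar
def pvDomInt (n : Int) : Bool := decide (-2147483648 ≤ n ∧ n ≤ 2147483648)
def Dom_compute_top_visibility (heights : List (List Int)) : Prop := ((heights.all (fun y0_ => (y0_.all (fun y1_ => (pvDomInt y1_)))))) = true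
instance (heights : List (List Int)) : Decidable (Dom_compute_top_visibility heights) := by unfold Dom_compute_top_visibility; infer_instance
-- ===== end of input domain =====

-- B replaces A's per-cell backward rescan by one monotonic stack pass per column (same return value on Pre_).

-- shared indexing helper: heights[k][j]; exact on Pre_ inputs, where every access is in range
def pvGet (heights : List (List Int)) (k j : Nat) : Int := (heights.getD k []).getD j 0

-- ===== PORT A =====
-- the inner while loop: k = i-1; while k > 0 and heights[k][j] < heights[i][j]: k -= 1
def aWhile (heights : List (List Int)) (j : Nat) (t : Int) : Nat → Nat
  | 0 => 0
  | k+1 => if pvGet heights (k+1) j < t then aWhile heights j t k else k+1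

-- the loop body: value stored into top_visibility_matrix[i][j]
def aCell (heights : List (List Int)) (i j : Nat) : Int :=
  if i = 0 then 0 else (i : Int) - (aWhile heights j (pvGet heights i j) (i-1) : Nat)

def get_scores (heights : List (List Int)) : List (List Int) :=
  (List.range heights.length).map (fun _ => (List.range (heights.headD []).length).map (fun _ => (0:Int)))

def compute_top_visibility (heights : List (List Int)) : List (List Int) :=
  (List.range heights.length).foldl (fun M i =>
    (List.range (heights.headD []).length).foldl (fun M j =>
      M.modify i (fun row => row.set j (aCell heights i j))) M) (get_scores heights)

-- ===== PORT B =====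
-- one step of the inner loop of Source B: pop smaller heights, record distance, push i (stack head = top)
def bStep (heights : List (List Int)) (j : Nat) (st : List Nat × List Int) (i : Nat) : List Nat × List Int :=
  let stack := st.1.dropWhile (fun k => pvGet heights k j < pvGet heights i j)
  (i :: stack, st.2 ++ [(i : Int) - ((stack.headD 0 : Nat) : Int)])

def bCol (heights : List (List Int)) (j n : Nat) : List Int :=
  ((List.range n).foldl (bStep heights j) ([], [])).2

def compute_top_visibility_alt (heights : List (List Int)) : List (List Int) :=
  let n := heights.length
  let m := (heights.headD []).length
  let cols := (List.range m).map (fun j => bCol heights j n)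
  (List.range n).map (fun i => (List.range m).map (fun j => (cols.getD j []).getD i 0))

-- ===== PRECONDITION & SPEC =====
-- Pre_ excludes the empty grid (heights[0] raises IndexError) and ragged grids with a row shorter
-- than the first: there Python A raises IndexError unless short-circuiting of its while condition
-- happens to skip every missing cell (an accident of evaluation order), and B raises IndexError.
def Pre_compute_top_visibility (heights : List (List Int)) : Prop :=
  heights ≠ [] ∧ ∀ row ∈ heights, (heights.headD []).length ≤ row.length
instance (heights : List (List Int)) : Decidable (Pre_compute_top_visibility heights) := by
  unfold Pre_compute_top_visibility; infer_instance
def pvWitness_compute_top_visibility : List (List Int) := [[1, 2], [3, 0], [2, 2]]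

def Spec_compute_top_visibility (heights : List (List Int)) (out : List (List Int)) : Prop := out = compute_top_visibility_alt heights
instance (heights : List (List Int)) (out : List (List Int)) : Decidable (Spec_compute_top_visibility heights out) := by unfold Spec_compute_top_visibility; infer_instance

-- ===== CLAIM (what is proved, stated in full; the proofs are below) =====
def Claim_equal_compute_top_visibility : Prop := ∀ (heights : List (List Int)), Dom_compute_top_visibility heights → Pre_compute_top_visibility heights → Spec_compute_top_visibility heights (compute_top_visibility heights)

-- ===== LEMMAS AND PROOFS =====

-- the stack Source B's inner loop holds before processing row i of column j
def stackAt (heights : List (List Int)) (j : Nat) : Nat → List Nat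
  | 0 => []
  | i+1 => i :: (stackAt heights j i).dropWhile (fun k => pvGet heights k j < pvGet heights i j)

theorem modify_id {α : Type} (l : List α) (i : Nat) : l.modify i (fun x => x) = l := by
  induction l generalizing i with
  | nil => simp
  | cons x xs ih =>
    cases i with
    | zero => simp [List.modify_cons]
    | succ k => simp [ih]

theorem modify_modify {α : Type} (l : List α) (i : Nat) (f g : α → α) :
    (l.modify i f).modify i g = l.modify i (fun x => g (f x)) := by
  induction l generalizing i with
  | nil => simp
  | cons x xs ih =>
    cases i with
    | zero => simp [List.modify_cons]
    | succ k => simp [ih]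

theorem modify_append_cons {α : Type} (a : List α) (y : α) (b : List α) (f : α → α) :
    (a ++ y :: b).modify a.length f = a ++ f y :: b := by
  induction a with
  | nil => simp [List.modify_cons]
  | cons x xs ih => simp [ih]

theorem foldl_modify (l : List Nat) (M : List (List Int)) (i : Nat)
    (f : Nat → List Int → List Int) :
    l.foldl (fun M j => M.modify i (f j)) M = M.modify i (fun r => l.foldl (fun r j => f j r) r) := by
  induction l generalizing M with
  | nil => simp [modify_id]
  | cons x xs ih => simp [List.foldl_cons, ih, modify_modify]

theorem foldl_set_range {α : Type} (h : Nat → α) :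
    ∀ (mm : Nat) (r : List α), mm ≤ r.length →
      (List.range mm).foldl (fun r j => r.set j (h j)) r = (List.range mm).map h ++ r.drop mm := by
  intro mm
  induction mm with
  | zero => simp
  | succ k ih =>
    intro r hr
    have hk : k < r.length := by omega
    rw [List.range_succ, List.foldl_append, List.map_append, ih r (by omega)]
    simp only [List.foldl_cons, List.foldl_nil, List.map_cons, List.map_nil]
    rw [List.drop_eq_getElem_cons hk, List.set_append]
    rw [if_neg (by simp)]
    simp only [List.length_map, List.length_range, Nat.sub_self, List.set_cons_zero]
    simp

theorem dropWhile_dropWhile (l : List Nat) (p q : Nat → Bool) (h : ∀ x, q x = true → p x = true) :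
    (l.dropWhile q).dropWhile p = l.dropWhile p := by
  induction l with
  | nil => simp
  | cons x xs ih =>
    by_cases hq : q x = true
    · rw [List.dropWhile_cons, if_pos hq, ih, List.dropWhile_cons, if_pos (h x hq)]
    · rw [List.dropWhile_cons, if_neg hq]

-- the stack query answers exactly A's backward while-loop scan
theorem stack_query (heights : List (List Int)) (j : Nat) :
    ∀ (i : Nat) (t : Int),
      (((stackAt heights j i).dropWhile (fun k => pvGet heights k j < t)).headD 0) = aWhile heights j t (i-1) := by
  intro i
  induction i with
  | zero => intro t; simp [stackAt, aWhile]
  | succ i ih =>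
    intro t
    simp only [stackAt, Nat.add_sub_cancel]
    by_cases hlt : pvGet heights i j < t
    · rw [List.dropWhile_cons, if_pos (by simpa using hlt)]
      rw [dropWhile_dropWhile _ _ _ (fun x hx => by
        simp only [decide_eq_true_eq] at hx ⊢; exact lt_trans hx hlt)]
      rw [ih t]
      cases i with
      | zero => simp [aWhile]
      | succ k => simp only [aWhile, if_pos hlt, Nat.add_sub_cancel]
    · rw [List.dropWhile_cons, if_neg (by simpa using hlt)]
      cases i with
      | zero => simp [aWhile]
      | succ k => simp only [aWhile, if_neg hlt, List.headD_cons]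

-- Source B's column value equals A's cell value
theorem bVal_eq_aCell (heights : List (List Int)) (j i : Nat) :
    (i : Int) - ((((stackAt heights j i).dropWhile (fun k => pvGet heights k j < pvGet heights i j)).headD 0 : Nat) : Int)
      = aCell heights i j := by
  rw [stack_query]
  cases i with
  | zero => simp [aWhile, aCell]
  | succ k => simp [aCell]

theorem foldB (heights : List (List Int)) (j : Nat) :
    ∀ nn : Nat, (List.range nn).foldl (bStep heights j) ([], [])
      = (stackAt heights j nn, (List.range nn).map (fun i => aCell heights i j)) := by
  intro nn
  induction nn with
  | zero => simp [stackAt]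
  | succ k ih =>
    rw [List.range_succ, List.foldl_append, ih]
    simp only [List.foldl_cons, List.foldl_nil, bStep, List.map_append, List.map_cons, List.map_nil]
    rw [bVal_eq_aCell]
    rfl

theorem bCol_eq (heights : List (List Int)) (j n : Nat) :
    bCol heights j n = (List.range n).map (fun i => aCell heights i j) := by
  rw [bCol, foldB]

-- A normalised: the mutated zero matrix is the matrix of aCell values
theorem A_norm (heights : List (List Int)) :
    compute_top_visibility heights
      = (List.range heights.length).map (fun i => (List.range (heights.headD []).length).map (fun j => aCell heights i j)) := by
  have zlen : (get_scores heights).length = heights.length := by simp [get_scores]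
  have key : ∀ nn : Nat, nn ≤ heights.length →
      (List.range nn).foldl (fun M i =>
        (List.range (heights.headD []).length).foldl
          (fun M j => M.modify i (fun row => row.set j (aCell heights i j))) M)
        (get_scores heights)
      = (List.range nn).map (fun i => (List.range (heights.headD []).length).map (fun j => aCell heights i j))
          ++ (get_scores heights).drop nn := by
    intro nn
    induction nn with
    | zero => simp
    | succ k ihk =>
      intro hk
      have hkn : k < heights.length := by omega
      rw [List.range_succ, List.foldl_append, ihk (by omega)]
      simp only [List.foldl_cons, List.foldl_nil, List.map_append, List.map_cons, List.map_nil]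
      rw [foldl_modify]
      have hdrop : (get_scores heights).drop k
          = ((List.range (heights.headD []).length).map (fun _ => (0:Int))) :: (get_scores heights).drop (k+1) := by
        rw [List.drop_eq_getElem_cons (by omega)]
        simp [get_scores]
      rw [hdrop]
      have hmod := modify_append_cons
        ((List.range k).map (fun i => (List.range (heights.headD []).length).map (fun j => aCell heights i j)))
        ((List.range (heights.headD []).length).map (fun _ => (0:Int)))
        ((get_scores heights).drop (k+1))
        (fun r => (List.range (heights.headD []).length).foldl (fun r j => r.set j (aCell heights k j)) r)
      rw [List.length_map, List.length_range] at hmod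
      rw [hmod, foldl_set_range (fun j => aCell heights k j) _ _ (by simp)]
      simp
  rw [compute_top_visibility, key heights.length (le_refl _)]
  simp [zlen]

theorem B_norm (heights : List (List Int)) :
    compute_top_visibility_alt heights
      = (List.range heights.length).map (fun i => (List.range (heights.headD []).length).map (fun j => aCell heights i j)) := by
  simp only [compute_top_visibility_alt]
  apply List.map_congr_left
  intro i hi
  apply List.map_congr_left
  intro j hj
  rw [List.mem_range] at hi hj
  have hcols : ((List.range (heights.headD []).length).map (fun j => bCol heights j heights.length)).getD j []
      = bCol heights j heights.length := by
    have hj' : j < (heights.head?.getD []).length := by simpa [List.headD_eq_head?_getD] using hj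
    simp [List.getD_eq_getElem?_getD, hj']
  rw [hcols, bCol_eq]
  rw [List.getD_eq_getElem?_getD]
  simp [hi]

-- ===== VERDICT (by name: the statement is the Claim_ definition above) =====
theorem compute_top_visibility_spec : Claim_equal_compute_top_visibility := by
  intro heights _ _
  unfold Spec_compute_top_visibility
  rw [A_norm, B_norm]
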